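-- pv_equiv track=rewrite | github.com/Eric-Lloyd/advent-of-code-python | src/day1/main.py | day_one_part_1
-- ===== SOURCE A (Python) =====
-- from typing import List
--
-- def day_one_part_1(rows: List[str]) -> int:
--   current_max_elf_calories = 0
--   current_elf_calories = 0
--   for row in rows:
--     if row == "": # this signifies a new elf
--       current_max_elf_calories = max([current_max_elf_calories, current_elf_calories])
--       current_elf_calories = 0
--     else:
--       carried_calories = int(row)
--       current_elf_calories += carried_calories
--   return current_max_elf_calories
-- ===== SOURCE B (Python) =====
-- from typing import List
--
-- def day_one_part_1(rows: List[str]) -> int: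
--   # Two-pass decomposition: first build the per-elf groups (a trailing group
--   # not terminated by "" is discarded, as in the original), then take the max
--   # of the group sums with a 0 floor.
--   groups = []
--   current = []
--   for row in rows:
--     if row == "":
--       groups.append(current)
--       current = []
--     else:
--       current.append(int(row))
--   return max([0] + [sum(g) for g in groups])
-- ===== Notes on version B (the rewrite author's own statement) =====
-- stated objective: alternative
-- what changed: A keeps a running max and running sum in one fused loop; B first materialises the list of per-elf groups, then computes max([0] + [sum(g) for g in groups]) in a separate pass.
import Mathlib
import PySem

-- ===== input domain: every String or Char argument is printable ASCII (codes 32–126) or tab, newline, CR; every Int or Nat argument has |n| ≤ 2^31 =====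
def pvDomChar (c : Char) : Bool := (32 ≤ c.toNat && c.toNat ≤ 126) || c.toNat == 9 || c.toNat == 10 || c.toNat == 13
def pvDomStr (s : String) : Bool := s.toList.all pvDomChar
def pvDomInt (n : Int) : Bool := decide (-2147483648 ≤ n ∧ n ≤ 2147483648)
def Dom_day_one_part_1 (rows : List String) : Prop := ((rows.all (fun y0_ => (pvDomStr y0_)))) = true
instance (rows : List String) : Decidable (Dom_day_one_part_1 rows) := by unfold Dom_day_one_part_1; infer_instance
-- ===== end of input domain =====

-- B replaces A's fused running-max/running-sum loop by a two-pass decomposition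
-- (build the list of per-elf groups, then max of group sums with a 0 floor); alternative, same cost.


-- ===== PORT A =====
-- loop body of A: on "" take the max and reset, else add int(row) to the running sum
-- (int(row) via PySem.Int.ofStr?; Pre_ guarantees it is some, so getD 0 is never the default)
def dayOneStepA (st : Int × Int) (row : String) : Int × Int :=
  if row == "" then (max st.1 st.2, 0)
  else (st.1, st.2 + (PySem.Int.ofStr? row).getD 0)

def day_one_part_1 (rows : List String) : Int :=
  (rows.foldl dayOneStepA (0, 0)).1

-- ===== PORT B =====
-- loop body of B: on "" append the current group to groups and reset, else append int(row)
def dayOneStepB (st : List (List Int) × List Int) (row : String) : List (List Int) × List Int :=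
  if row == "" then (st.1 ++ [st.2], [])
  else (st.1, st.2 ++ [(PySem.Int.ofStr? row).getD 0])

def day_one_part_1_alt (rows : List String) : Int :=
  let groups := (rows.foldl dayOneStepB ([], [])).1
  -- max([0] + [sum(g) for g in groups])
  match PySem.List.max? ((0 : Int) :: groups.map List.sum) (fun y => y) with
  | some m => m
  | none => 0

-- ===== PRECONDITION & SPEC =====
-- Pre_ excludes exactly the inputs where Python's int(row) raises ValueError (a non-empty
-- row that does not parse as an int); both A and B raise there.
def Pre_day_one_part_1 (rows : List String) : Prop :=
  (rows.all (fun s => s == "" || (PySem.Int.ofStr? s).isSome)) = true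
instance (rows : List String) : Decidable (Pre_day_one_part_1 rows) := by
  unfold Pre_day_one_part_1; infer_instance

def pvWitness_day_one_part_1 : List String := ["1", "2", "", " -3 ", ""]

def Spec_day_one_part_1 (rows : List String) (out : Int) : Prop := out = day_one_part_1_alt rows
instance (rows : List String) (out : Int) : Decidable (Spec_day_one_part_1 rows out) := by unfold Spec_day_one_part_1; infer_instance

-- ===== CLAIM (what is proved, stated in full; the proofs are below) =====
def Claim_equal_day_one_part_1 : Prop := ∀ (rows : List String), Dom_day_one_part_1 rows → Pre_day_one_part_1 rows → Spec_day_one_part_1 rows (day_one_part_1 rows)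

-- ===== LEMMAS AND PROOFS =====

-- Invariant linking the two loops: A's running max is the max of the sums of the
-- groups B has collected so far, and A's running sum is the sum of B's current group.
lemma dayOne_fold_key : ∀ (rows : List String) (gs : List (List Int)) (cur : List Int),
    (rows.foldl dayOneStepA ((gs.map List.sum).foldl max 0, cur.sum)).1
      = (((rows.foldl dayOneStepB (gs, cur)).1).map List.sum).foldl max 0 := by
  intro rows
  induction rows with
  | nil => intro gs cur; rfl
  | cons row rest ih =>
    intro gs cur
    by_cases h : row = ""
    · simp only [List.foldl_cons, dayOneStepA, dayOneStepB, h, BEq.rfl, if_true]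
      have : max ((gs.map List.sum).foldl max 0) cur.sum
          = (((gs ++ [cur]).map List.sum).foldl max 0) := by
        simp [List.foldl_append]
      rw [this]
      simpa using ih (gs ++ [cur]) []
    · simp only [List.foldl_cons, dayOneStepA, dayOneStepB, beq_iff_eq, h, if_false]
      have : cur.sum + (PySem.Int.ofStr? row).getD 0
          = (cur ++ [(PySem.Int.ofStr? row).getD 0]).sum := by simp
      rw [this]
      exact ih gs (cur ++ [(PySem.Int.ofStr? row).getD 0])

-- ===== VERDICT (by name: the statement is the Claim_ definition above) =====
theorem day_one_part_1_spec : Claim_equal_day_one_part_1 := by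
  intro rows _ _
  unfold Spec_day_one_part_1 day_one_part_1 day_one_part_1_alt
  simp only [PySem.List.max?_id_cons]
  simpa using dayOne_fold_key rows [] []
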